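-- pv_equiv track=rewrite | github.com/RogerMTorres/MisionTic | Ciclo1/Proyecto 1/nivelacionclase3/Clase3p2.py | producto_mas_costoso
-- ===== SOURCE A (Python) =====
-- def producto_mas_costoso (carrito_compras: dict) -> str:
--     if carrito_compras == {}:
--         return "no hay productos en el carrito"
--
--     productos = sorted(carrito_compras.keys())
--     maximo = max(carrito_compras.values())
--
--     for producto in productos:
--         if carrito_compras[producto] ==maximo:
--             return producto
-- ===== SOURCE B (Python) =====
-- def producto_mas_costoso(carrito_compras: dict) -> str:
--     if carrito_compras == {}:
--         return "no hay productos en el carrito"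
--     groups = {}
--     for producto, precio in carrito_compras.items():
--         groups.setdefault(precio, []).append(producto)
--     return min(groups[max(groups)])
-- ===== Notes on version B (the rewrite author's own statement) =====
-- stated objective: alternative
-- what changed: Replaces A's sort-all-keys-then-scan with a one-pass price-to-keys grouping dict followed by max over the prices and min over the winning group (no sort).
import Mathlib
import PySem

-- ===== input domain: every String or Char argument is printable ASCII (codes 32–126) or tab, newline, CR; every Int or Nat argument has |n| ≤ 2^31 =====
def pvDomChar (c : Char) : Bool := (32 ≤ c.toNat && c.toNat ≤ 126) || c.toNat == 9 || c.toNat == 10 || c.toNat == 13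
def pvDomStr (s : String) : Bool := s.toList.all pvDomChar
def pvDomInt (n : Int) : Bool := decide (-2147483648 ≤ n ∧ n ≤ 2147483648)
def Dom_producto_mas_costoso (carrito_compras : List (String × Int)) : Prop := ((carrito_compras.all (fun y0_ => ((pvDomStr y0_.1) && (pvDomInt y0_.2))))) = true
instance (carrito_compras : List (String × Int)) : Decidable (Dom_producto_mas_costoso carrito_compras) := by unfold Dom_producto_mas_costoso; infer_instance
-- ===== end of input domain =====

-- B replaces A's sort-all-keys-then-scan by a one-pass price→keys grouping dict, then max over prices and min over the winning group (alternative decomposition, no sort).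

-- ===== PORT A =====
-- the 'for producto in productos: if …: return producto' loop; "" stands for Python's
-- fall-through None (unreachable inside Pre_, where the maximum value is always attained)
def pvFindMax (d : List (String × Int)) (maximo : Int) : List String → String
  | [] => ""
  | p :: rest =>
      if (PySem.Dict.mk d).get? p == some maximo then p else pvFindMax d maximo rest

def producto_mas_costoso (carrito_compras : List (String × Int)) : String :=
  if carrito_compras = [] then "no hay productos en el carrito"
  else
    let productos := PySem.List.sorted (carrito_compras.map Prod.fst) (fun x => x) false
    match PySem.List.max? (carrito_compras.map Prod.snd) (fun y => y) with
    | none => ""   -- max() on the empty sequence: unreachable, the list is nonempty here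
    | some maximo => pvFindMax carrito_compras maximo productos

-- ===== PORT B =====
def producto_mas_costoso_alt (carrito_compras : List (String × Int)) : String :=
  if carrito_compras = [] then "no hay productos en el carrito"
  else
    let groups := carrito_compras.foldl
      (fun d kv => d.modify kv.2 ([] : List String) (fun l => l ++ [kv.1])) PySem.Dict.empty
    match PySem.List.max? groups.keys (fun y => y) with
    | none => ""   -- unreachable: groups is nonempty here
    | some mp =>
      match PySem.List.min? (groups.getD mp []) (fun y => y) with
      | none => ""   -- unreachable: the winning group is nonempty
      | some r => r

-- ===== PRECONDITION & SPEC =====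
-- Pre_ excludes association lists with duplicate keys: they do not represent any Python
-- dict argument (a dict has unique keys), and on them A's loop can fall through and
-- return None, which is not a value of the declared str type.
def Pre_producto_mas_costoso (carrito_compras : List (String × Int)) : Prop :=
  (carrito_compras.map Prod.fst).Nodup
instance (carrito_compras : List (String × Int)) : Decidable (Pre_producto_mas_costoso carrito_compras) := by
  unfold Pre_producto_mas_costoso; infer_instance
def pvWitness_producto_mas_costoso : (List (String × Int)) := [("pan", 3), ("sal", 7), ("ajo", 7)]
def Spec_producto_mas_costoso (carrito_compras : List (String × Int)) (out : String) : Prop := out = producto_mas_costoso_alt carrito_compras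
instance (carrito_compras : List (String × Int)) (out : String) : Decidable (Spec_producto_mas_costoso carrito_compras out) := by unfold Spec_producto_mas_costoso; infer_instance

-- ===== CLAIM (what is proved, stated in full; the proofs are below) =====
def Claim_equal_producto_mas_costoso : Prop := ∀ (carrito_compras : List (String × Int)), Dom_producto_mas_costoso carrito_compras → Pre_producto_mas_costoso carrito_compras → Spec_producto_mas_costoso carrito_compras (producto_mas_costoso carrito_compras)

-- ===== LEMMAS AND PROOFS =====

-- first satisfying element of a ≤-sorted list equals any minimal satisfying element
theorem pvFindMax_eq_min (d : List (String × Int)) (maximo : Int) (L : List String)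
    (hL : L.Pairwise (· ≤ ·)) (m : String) (hm : m ∈ L)
    (hP : (PySem.Dict.mk d).get? m = some maximo)
    (hmin : ∀ y ∈ L, (PySem.Dict.mk d).get? y = some maximo → m ≤ y) :
    pvFindMax d maximo L = m := by
  induction L with
  | nil => cases hm
  | cons a t ih =>
    rw [List.pairwise_cons] at hL
    by_cases ha : (PySem.Dict.mk d).get? a = some maximo
    · have h1 : m ≤ a := hmin a (List.mem_cons_self) ha
      have h2 : a ≤ m := by
        rcases List.mem_cons.mp hm with h | h
        · exact le_of_eq h.symm
        · exact hL.1 m h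
      have heq : a = m := le_antisymm h2 h1
      subst heq
      simp [pvFindMax, hP]
    · have hm' : m ∈ t := by
        rcases List.mem_cons.mp hm with h | h
        · exact absurd (h ▸ hP) ha
        · exact h
      simp only [pvFindMax, beq_iff_eq, ha, if_false]
      exact ih hL.2 hm' (fun y hy => hmin y (List.mem_cons_of_mem _ hy))

theorem producto_mas_costoso_spec' (xs : List (String × Int))
    (hnd : (xs.map Prod.fst).Nodup) :
    producto_mas_costoso xs = producto_mas_costoso_alt xs := by
  by_cases hne : xs = []
  · simp [producto_mas_costoso, producto_mas_costoso_alt, hne]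
  -- the grouping dict of B, via the PySem grouping lemmas (fold rewritten over swapped pairs)
  have hfold : ∀ (d : PySem.Dict Int (List String)),
      xs.foldl (fun d kv => d.modify kv.2 ([] : List String) (fun l => l ++ [kv.1])) d
      = (xs.map Prod.swap).foldl (fun d p => d.modify p.1 ([] : List String) (fun l => l ++ [p.2])) d := by
    intro d; rw [List.foldl_map]; rfl
  set groups := xs.foldl
      (fun d kv => d.modify kv.2 ([] : List String) (fun l => l ++ [kv.1])) PySem.Dict.empty with hg
  -- every lookup in groups is the in-order list of keys carrying that price
  have hgetD : ∀ v : Int, groups.getD v [] = (xs.filter (fun kv => kv.2 == v)).map Prod.fst := by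
    intro v
    rw [hg, hfold, PySem.Dict.getD_foldl_modify_append]
    simp [List.filter_map, List.map_map, Function.comp_def, Prod.swap]
  -- the keys of groups are exactly the prices occurring in xs
  have hkeys : ∀ v : Int, v ∈ groups.keys ↔ v ∈ xs.map Prod.snd := by
    intro v
    rw [hg, hfold, PySem.Dict.keys_foldl_modify_key]
    simp only [PySem.Dict.keys_empty, PySem.Set.update_nil_left, PySem.Set.mem_ofList,
      List.map_map]
    constructor
    · rintro h; simpa [Function.comp_def, Prod.swap] using h
    · intro h; simpa [Function.comp_def, Prod.swap] using h
  -- nonempty: both max? computations return some, and the same value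
  obtain ⟨kv0, hkv0⟩ := List.exists_mem_of_ne_nil xs hne
  have hvals_ne : xs.map Prod.snd ≠ [] := by simpa using hne
  have hkeys_ne : groups.keys ≠ [] := by
    intro h
    have := (hkeys kv0.2).mpr (List.mem_map_of_mem hkv0)
    rw [h] at this; cases this
  have hma' : PySem.List.max? (xs.map Prod.snd) (fun y : Int => y) ≠ none :=
    fun h => hvals_ne ((PySem.List.max?_eq_none_iff _ _).mp h)
  obtain ⟨ma, hma⟩ := Option.ne_none_iff_exists'.mp hma'
  have hmb' : PySem.List.max? groups.keys (fun y : Int => y) ≠ none :=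
    fun h => hkeys_ne ((PySem.List.max?_eq_none_iff _ _).mp h)
  obtain ⟨mb, hmb⟩ := Option.ne_none_iff_exists'.mp hmb'
  have hmab : ma = mb := by
    have h1 : ma ∈ xs.map Prod.snd := PySem.List.max?_mem hma
    have h2 : mb ∈ groups.keys := PySem.List.max?_mem hmb
    have h3 := PySem.List.max?_isMax hma mb ((hkeys mb).mp h2)
    have h4 := PySem.List.max?_isMax hmb ma ((hkeys ma).mpr h1)
    exact le_antisymm h4 h3
  -- the winning group is nonempty; let m be its minimum
  have hgrp : groups.getD mb [] = (xs.filter (fun kv => kv.2 == mb)).map Prod.fst := hgetD mb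
  have hgrp_ne : groups.getD mb [] ≠ [] := by
    rw [hgrp]
    obtain ⟨kv1, hkv1, hv1⟩ := List.mem_map.mp ((hkeys mb).mp (PySem.List.max?_mem hmb))
    intro h
    have : kv1 ∈ xs.filter (fun kv => kv.2 == mb) := by
      rw [List.mem_filter]; exact ⟨hkv1, by simp [hv1]⟩
    rw [List.map_eq_nil_iff.mp h] at this; cases this
  have hm' : PySem.List.min? (groups.getD mb []) (fun y : String => y) ≠ none :=
    fun h => hgrp_ne ((PySem.List.min?_eq_none_iff _ _).mp h)
  obtain ⟨m, hm⟩ := Option.ne_none_iff_exists'.mp hm'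
  -- membership in the group ↔ lookup returns mb (uses Nodup keys)
  have hmem_grp : ∀ y : String, y ∈ groups.getD mb [] ↔ (PySem.Dict.mk xs).get? y = some mb := by
    intro y
    rw [hgrp]
    constructor
    · intro hy
      obtain ⟨kv, hkv, hfst⟩ := List.mem_map.mp hy
      rw [List.mem_filter] at hkv
      have : (y, mb) ∈ xs := by
        have := hkv.1
        have h2 : kv.2 = mb := by simpa using hkv.2
        rw [← hfst, ← h2]; exact this
      exact PySem.Dict.get?_of_mem_items (d := PySem.Dict.mk xs) (by simpa using this)
        (by simpa [PySem.Dict.keys] using hnd)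
    · intro hy
      have : (y, mb) ∈ xs := by
        have := PySem.Dict.mem_items_of_get?_eq_some _ hy
        simpa using this
      exact List.mem_map.mpr ⟨(y, mb), List.mem_filter.mpr ⟨this, by simp⟩, rfl⟩
  have hmP : (PySem.Dict.mk xs).get? m = some mb := (hmem_grp m).mp (PySem.List.min?_mem hm)
  -- unfold both ports
  rw [producto_mas_costoso, producto_mas_costoso_alt, if_neg hne, if_neg hne]
  simp only [← hg]
  subst hmab
  rw [hma, hmb]
  simp only [hm]
  -- A's scan over the sorted keys returns m
  refine pvFindMax_eq_min xs ma _ (PySem.List.sorted_pairwise _ _) m ?_ hmP ?_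
  · rw [PySem.List.mem_sorted]
    have hmg := PySem.List.min?_mem hm
    rw [hgrp] at hmg
    obtain ⟨kv, hkv, hfst⟩ := List.mem_map.mp hmg
    exact List.mem_map.mpr ⟨kv, (List.mem_filter.mp hkv).1, hfst⟩
  · intro y hy hyP
    exact PySem.List.min?_isMin hm y ((hmem_grp y).mpr hyP)

-- ===== VERDICT (by name: the statement is the Claim_ definition above) =====
theorem producto_mas_costoso_spec : Claim_equal_producto_mas_costoso := by
  intro xs _ hpre
  unfold Spec_producto_mas_costoso
  exact producto_mas_costoso_spec' xs hpre
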